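-- pv_equiv track=rewrite | github.com/asryanani1997/Homework_Week7_2 | Ex9.py | firstPlace
-- ===== SOURCE A (Python) =====
-- def firstPlace(x):
--     if not any(i=="=" for i in x):
--         return "No road available"
--     if not any(i.isalpha() for i in x):
--         return "No car available"
--     else:
--         x=x.replace("=", "")
--         return(x[-1])
-- ===== SOURCE B (Python) =====
-- def firstPlace(x):
--     saw_eq = False
--     saw_alpha = False
--     last = None
--     for c in x:
--         if c == "=":
--             saw_eq = True
--         else:
--             last = c
--         if c.isalpha():
--             saw_alpha = True
--     if not saw_eq:
--         return "No road available"
--     if not saw_alpha: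
--         return "No car available"
--     return last
-- ===== Notes on version B (the rewrite author's own statement) =====
-- stated objective: alternative
-- what changed: Replaces A's two any() scans plus replace()+negative indexing (multiple passes) with a single pass maintaining saw_eq, saw_alpha and the last non-equals character.
import Mathlib
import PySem

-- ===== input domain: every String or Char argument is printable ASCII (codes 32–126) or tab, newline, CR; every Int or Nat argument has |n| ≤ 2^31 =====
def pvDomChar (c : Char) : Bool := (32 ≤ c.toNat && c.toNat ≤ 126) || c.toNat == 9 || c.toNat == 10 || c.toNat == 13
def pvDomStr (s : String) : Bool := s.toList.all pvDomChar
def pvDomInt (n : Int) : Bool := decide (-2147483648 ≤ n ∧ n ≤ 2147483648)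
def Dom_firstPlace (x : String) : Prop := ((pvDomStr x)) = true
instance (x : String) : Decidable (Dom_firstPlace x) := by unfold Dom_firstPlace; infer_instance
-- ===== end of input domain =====

-- B replaces A's two any() scans plus replace()+negative indexing by one pass keeping
-- saw_eq / saw_alpha / last non-equals character (objective: alternative, single traversal).

-- ===== PORT A =====
def firstPlace (x : String) : String :=
  if !(x.toList.any (fun i => i == '=')) then "No road available"
  else if !(x.toList.any (fun i => PySem.Chars.isalpha i)) then "No car available"
  else
    let x' := PySem.Str.replace x "=" ""
    match PySem.Str.pyGet? x' (-1) with
    | some c => String.ofList [c]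
    | none => ""   -- unreachable: an alpha char survives removing '=', so x' ≠ ""

-- ===== PORT B =====
def firstPlace_alt (x : String) : String :=
  let st := x.toList.foldl
    (fun (st : Bool × Bool × Option Char) c =>
      ((if c == '=' then true else st.1),
       (if PySem.Chars.isalpha c then true else st.2.1),
       (if c == '=' then st.2.2 else some c)))
    (false, false, none)
  if !st.1 then "No road available"
  else if !st.2.1 then "No car available"
  else match st.2.2 with
    | some c => String.ofList [c]
    | none => ""   -- unreachable: the alpha char set `last`

-- ===== PRECONDITION & SPEC =====
def Spec_firstPlace (x : String) (out : String) : Prop := out = firstPlace_alt x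
instance (x : String) (out : String) : Decidable (Spec_firstPlace x out) := by unfold Spec_firstPlace; infer_instance

-- ===== CLAIM (what is proved, stated in full; the proofs are below) =====
def Claim_equal_firstPlace : Prop := ∀ (x : String), Dom_firstPlace x → Spec_firstPlace x (firstPlace x)

-- ===== LEMMAS AND PROOFS =====

-- replace.go with pattern "=" and empty replacement is filtering out '='
theorem pv_go_filter (fuel : Nat) : ∀ (l acc : List Char), l.length ≤ fuel →
    PySem.Chars.replace.go ['='] [] fuel l acc = acc.reverse ++ l.filter (fun c => !(c == '=')) := by
  induction fuel with
  | zero =>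
    intro l acc h
    have : l = [] := List.length_eq_zero_iff.mp (Nat.le_zero.mp h)
    subst this; simp [PySem.Chars.replace.go]
  | succ n ih =>
    intro l acc h
    cases l with
    | nil => simp [PySem.Chars.replace.go]
    | cons c t =>
      by_cases hc : c = '='
      · subst hc
        rw [show PySem.Chars.replace.go ['='] [] (n+1) ('=' :: t) acc
              = PySem.Chars.replace.go ['='] [] n t acc by
            simp [PySem.Chars.replace.go, List.isPrefixOf]]
        rw [ih t acc (by simpa using h)]
        simp
      · have hc' : ('=' = c) = False := by simp [eq_comm, hc]
        rw [show PySem.Chars.replace.go ['='] [] (n+1) (c :: t) acc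
              = PySem.Chars.replace.go ['='] [] n t (c :: acc) by
            simp [PySem.Chars.replace.go, List.isPrefixOf, hc']]
        rw [ih t (c :: acc) (by simpa using h)]
        simp [hc]

theorem pv_replace_filter (l : List Char) :
    PySem.Chars.replace l ['='] [] = l.filter (fun c => !(c == '=')) := by
  rw [PySem.Chars.replace]
  simpa using pv_go_filter l.length l [] le_rfl

-- the single-pass fold computes (any '=', any alpha, last non-'=' char)
theorem pv_fold_inv : ∀ (l : List Char) (b1 b2 : Bool) (lo : Option Char),
    l.foldl (fun (st : Bool × Bool × Option Char) c =>
      ((if c == '=' then true else st.1),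
       (if PySem.Chars.isalpha c then true else st.2.1),
       (if c == '=' then st.2.2 else some c))) (b1, b2, lo)
    = (b1 || l.any (fun i => i == '='),
       b2 || l.any (fun i => PySem.Chars.isalpha i),
       ((l.filter (fun c => !(c == '='))).getLast?).or lo) := by
  intro l
  induction l with
  | nil => simp
  | cons c t ih =>
    intro b1 b2 lo
    simp only [List.foldl_cons]
    rw [ih]
    simp only [List.any_cons, Prod.mk.injEq]
    refine ⟨?_, ?_, ?_⟩
    · by_cases hc : c = '=' <;> cases b1 <;> simp [hc]
    · by_cases ha : PySem.Chars.isalpha c = true <;> cases b2 <;> simp_all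
    · by_cases hc : c = '='
      · simp [hc]
      · have hc' : (c == '=') = false := by simp [hc]
        simp only [hc', if_false, Bool.false_eq_true, List.filter_cons, Bool.not_false, if_true]
        cases hgl : (t.filter (fun c => !(c == '='))).getLast? with
        | none =>
          have : t.filter (fun c => !(c == '=')) = [] := List.getLast?_eq_none_iff.mp hgl
          simp [this, Option.or]
        | some d =>
          simp [List.getLast?_cons, hgl, Option.or]

theorem pv_alpha_ne_eq {c : Char} (h : PySem.Chars.isalpha c = true) : (c == '=') = false := by
  simp only [PySem.Chars.isalpha, PySem.Chars.isupper, PySem.Chars.islower, Bool.or_eq_true] at h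
  simp only [beq_eq_false_iff_ne, ne_eq]
  rintro rfl; simp_all

theorem pv_filter_ne_nil {l : List Char} (h : l.any (fun i => PySem.Chars.isalpha i) = true) :
    l.filter (fun c => !(c == '=')) ≠ [] := by
  simp only [List.any_eq_true] at h
  obtain ⟨c, hc, ha⟩ := h
  intro hnil
  have := List.filter_eq_nil_iff.mp hnil c hc
  simp [pv_alpha_ne_eq ha] at this

-- ===== VERDICT (by name: the statement is the Claim_ definition above) =====
theorem firstPlace_spec : Claim_equal_firstPlace := by
  intro x _
  show firstPlace x = firstPlace_alt x
  unfold firstPlace firstPlace_alt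
  simp only [pv_fold_inv, Bool.false_or, Option.or_none]
  by_cases h1 : x.toList.any (fun i => i == '=') = true
  · by_cases h2 : x.toList.any (fun i => PySem.Chars.isalpha i) = true
    · have hne := pv_filter_ne_nil h2
      cases hgl : (x.toList.filter (fun c => !(c == '='))).getLast? with
      | none => exact absurd (List.getLast?_eq_none_iff.mp hgl) hne
      | some c =>
        simp [h1, h2, PySem.Str.pyGet?_eq, PySem.Chars.pyGet?_eq_listPyGet?,
          PySem.Str.toList_replace, pv_replace_filter, PySem.List.pyGet?_neg_one, hgl]
    · simp [h1, h2]
  · simp [h1]
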